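-- pv_equiv track=rewrite | github.com/aodelta/python_utility | doc/math/all_prime_factors.doc.py | reduce_with_power
-- ===== SOURCE A (Python) =====
-- def reduce_with_power(diviseurs):
--     diviseurs.sort() # On trie les diviseurs pour les avoir dans le bon ordre à la fin
--     diviseurs_dictionnary_powers = {} # Dictionnaire contenant comme clé le nombre ciblé, et comme valeur la puissance
--     for diviseur in diviseurs:
--         if diviseur in diviseurs_dictionnary_powers: # Si le nombre est déjà enregistré (s'il a déjà une puissance)
--             diviseurs_dictionnary_powers[diviseur] += 1 # On en rajoute une
--         else:
--             diviseurs_dictionnary_powers[diviseur] = 1 # Sinon, on la crée avec la valeur 1 (1 puissance, logique)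
--
--     return diviseurs_dictionnary_powers
-- ===== SOURCE B (Python) =====
-- def reduce_with_power(diviseurs):
--     # Sort in place (same observable mutation as A), then do a single
--     # run-length-encoding pass over the sorted list: no dict membership tests.
--     diviseurs.sort()
--     result = {}
--     if not diviseurs:
--         return result
--     cur = diviseurs[0]
--     count = 1
--     for x in diviseurs[1:]:
--         if x == cur:
--             count += 1
--         else:
--             result[cur] = count
--             cur = x
--             count = 1
--     result[cur] = count
--     return result
-- ===== Notes on version B (the rewrite author's own statement) =====
-- stated objective: alternative
-- what changed: B replaces A's per-element dict-membership accumulation with a single run-length-encoding pass over the sorted list, emitting each (value, run length) pair once.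
import Mathlib
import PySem

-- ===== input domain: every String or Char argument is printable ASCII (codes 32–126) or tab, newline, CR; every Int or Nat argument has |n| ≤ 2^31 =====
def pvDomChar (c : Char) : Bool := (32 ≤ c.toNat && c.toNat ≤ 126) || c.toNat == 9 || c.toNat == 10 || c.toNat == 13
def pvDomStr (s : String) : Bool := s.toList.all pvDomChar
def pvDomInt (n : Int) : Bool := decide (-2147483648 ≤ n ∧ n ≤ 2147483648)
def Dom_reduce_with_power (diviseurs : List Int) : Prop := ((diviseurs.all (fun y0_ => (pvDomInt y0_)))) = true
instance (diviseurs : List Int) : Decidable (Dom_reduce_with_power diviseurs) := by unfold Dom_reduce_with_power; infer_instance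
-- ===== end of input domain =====

-- B replaces A's per-element dict-membership accumulation with a single run-length-encoding
-- pass over the sorted list (both sort the argument in place in Python; equivalence is about the return value).


-- ===== PORT A =====
-- diviseurs.sort(); for diviseur in diviseurs: if in dict then +=1 else =1; return dict
def reduce_with_power (diviseurs : List Int) : List (Int × Int) :=
  ((PySem.List.sorted diviseurs (fun x => x) false).foldl
    (fun d x => if d.contains x then d.modify x 0 (· + 1) else d.insert x 1)
    (PySem.Dict.empty : PySem.Dict Int Int)).items

-- ===== PORT B =====
-- the run-length-encoding loop of Source B: cur/count accumulator, emit on value change and at the end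
def rwpRuns : Int → Int → List Int → List (Int × Int)
  | cur, count, [] => [(cur, count)]
  | cur, count, x :: xs =>
    if x == cur then rwpRuns cur (count + 1) xs
    else (cur, count) :: rwpRuns x 1 xs

def reduce_with_power_alt (diviseurs : List Int) : List (Int × Int) :=
  match PySem.List.sorted diviseurs (fun x => x) false with
  | [] => []
  | x :: xs => rwpRuns x 1 xs

-- ===== PRECONDITION & SPEC =====
def Spec_reduce_with_power (diviseurs : List Int) (out : List (Int × Int)) : Prop := out = reduce_with_power_alt diviseurs
instance (diviseurs : List Int) (out : List (Int × Int)) : Decidable (Spec_reduce_with_power diviseurs out) := by unfold Spec_reduce_with_power; infer_instance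

-- ===== CLAIM (what is proved, stated in full; the proofs are below) =====
def Claim_equal_reduce_with_power : Prop := ∀ (diviseurs : List Int), Dom_reduce_with_power diviseurs → Spec_reduce_with_power diviseurs (reduce_with_power diviseurs)

-- ===== LEMMAS AND PROOFS =====

-- A's dict loop, started after inserting the first element of a run, appends the runs.
theorem rwp_fold_run (xs : List Int) : ∀ (x n : Int) (d : PySem.Dict Int Int),
    (x :: xs).Pairwise (· ≤ ·) → (∀ k ∈ d.keys, k < x) → d.keys.Nodup →
    ((xs.foldl (fun d x => if d.contains x then d.modify x 0 (· + 1) else d.insert x 1)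
      (d.insert x n)).items) = d.items ++ rwpRuns x n xs := by
  induction xs with
  | nil =>
    intro x n d _ hlt _
    have hc : d.contains x = false := by
      by_contra h
      have : d.contains x = true := by simpa using h
      have := hlt x ((PySem.Dict.contains_iff_mem_keys d x).mp this)
      omega
    simp [rwpRuns, PySem.Dict.items_insert_of_not_contains d n hc]
  | cons y ys ih =>
    intro x n d hpw hlt hnd
    have hxy : x ≤ y := (List.pairwise_cons.mp hpw).1 y (by simp)
    by_cases hyx : y = x
    · subst hyx
      have hc : (d.insert y n).contains y = true := PySem.Dict.contains_insert_self d y n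
      have hmod : (d.insert y n).modify y 0 (· + 1) = d.insert y (n + 1) := by
        simp [PySem.Dict.modify, PySem.Dict.getD_insert_self, PySem.Dict.insert_insert_self]
      have hpw' : (y :: ys).Pairwise (· ≤ ·) := by
        rcases List.pairwise_cons.mp hpw with ⟨h1, h2⟩
        rcases List.pairwise_cons.mp h2 with ⟨h3, h4⟩
        exact List.pairwise_cons.mpr ⟨fun z hz => le_trans (h1 y (by simp)) (h3 z hz), h4⟩
      simp only [List.foldl_cons, hc, hmod, rwpRuns, beq_self_eq_true, if_true]
      exact ih y (n + 1) d hpw' hlt hnd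
    · have hxy' : x < y := lt_of_le_of_ne hxy (fun h => hyx h.symm)
      have hcy : (d.insert x n).contains y = false := by
        have hdy : d.contains y = false := by
          by_contra h
          have : d.contains y = true := by simpa using h
          have := hlt y ((PySem.Dict.contains_iff_mem_keys d y).mp this)
          omega
        rw [PySem.Dict.contains_insert]
        simp [hdy, hyx]
      have hlt' : ∀ k ∈ (d.insert x n).keys, k < y := by
        intro k hk
        rcases (PySem.Dict.mem_keys_insert d x k n).mp hk with h | h
        · subst h; exact hxy'
        · exact lt_trans (hlt k h) hxy'
      have hnd' : (d.insert x n).keys.Nodup := PySem.Dict.nodup_keys_insert d x n hnd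
      have hpw' : (y :: ys).Pairwise (· ≤ ·) := (List.pairwise_cons.mp hpw).2
      have hcx : d.contains x = false := by
        by_contra h
        have : d.contains x = true := by simpa using h
        have := hlt x ((PySem.Dict.contains_iff_mem_keys d x).mp this)
        omega
      simp only [List.foldl_cons, hcy, Bool.false_eq_true, if_false]
      rw [ih y 1 (d.insert x n) hpw' hlt' hnd',
          PySem.Dict.items_insert_of_not_contains d n hcx]
      simp [rwpRuns, hyx]

-- ===== VERDICT (by name: the statement is the Claim_ definition above) =====
theorem reduce_with_power_spec : Claim_equal_reduce_with_power := by
  intro diviseurs _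
  unfold Spec_reduce_with_power reduce_with_power reduce_with_power_alt
  have hpw := PySem.List.sorted_pairwise diviseurs (fun x => x)
  cases hs : PySem.List.sorted diviseurs (fun x => x) false with
  | nil => simp [PySem.Dict.empty]
  | cons x xs =>
    rw [hs] at hpw
    have hc : (PySem.Dict.empty : PySem.Dict Int Int).contains x = false :=
      PySem.Dict.contains_empty x
    simp only [List.foldl_cons, hc, Bool.false_eq_true, if_false]
    rw [rwp_fold_run xs x 1 PySem.Dict.empty hpw (by simp [PySem.Dict.keys_empty])
        (by simp [PySem.Dict.keys_empty])]
    simp [PySem.Dict.empty]
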